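-- pv_equiv track=rewrite | github.com/dawsonblack/Argus | rasa/DEAD_AttributeIdentification.py | _normalize_write_to_attrs
-- ===== SOURCE A (Python) =====
-- from typing import Dict, Any, List, Tuple, Optional, Set
--
-- def _normalize_write_to_attrs(write_cmds: List[str]) -> Tuple[List[str], Dict[str, Set[str]]]:
--     """
--     Map write command names to attribute space.
--     Returns (attr_candidates, attr->available_commands)
--       e.g. ["on","off","volume"] -> (["power","volume"], {"power":{"on","off"}, "volume":{"volume"}})
--     """
--     attr2cmds: Dict[str, Set[str]] = {}
--     cmds = {c.lower() for c in write_cmds}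
--     if ("on" in cmds) or ("off" in cmds):
--         attr2cmds["power"] = {*(cmds & {"on","off"})}
--     if "volume" in cmds:
--         attr2cmds["volume"] = {"volume"}
--     # extend here for more commands/attributes
--     return (list(attr2cmds.keys()), attr2cmds)
-- ===== SOURCE B (Python) =====
-- from typing import Dict, List, Tuple, Set
--
-- # Inverted-index version: classify each command individually via a trigger->attribute
-- # map in one pass over the input, then emit attributes in canonical order.
-- _TRIGGER2ATTR: Dict[str, str] = {"on": "power", "off": "power", "volume": "volume"}
-- _ATTR_ORDER = ("power", "volume")
--
-- def _normalize_write_to_attrs(write_cmds: List[str]) -> Tuple[List[str], Dict[str, Set[str]]]: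
--     grouped: Dict[str, Set[str]] = {}
--     for c in write_cmds:
--         lc = c.lower()
--         attr = _TRIGGER2ATTR.get(lc)
--         if attr is not None:
--             grouped.setdefault(attr, set()).add(lc)
--     attr2cmds = {a: grouped[a] for a in _ATTR_ORDER if a in grouped}
--     return (list(attr2cmds.keys()), attr2cmds)
-- ===== Notes on version B (the rewrite author's own statement) =====
-- stated objective: alternative
-- what changed: Instead of building a global lowered-command set and intersecting it with each attribute's trigger set, B classifies each command individually through an inverted trigger-to-attribute map in one pass, grouping matched commands per attribute, and then emits attributes in a fixed canonical order.
import Mathlib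
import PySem

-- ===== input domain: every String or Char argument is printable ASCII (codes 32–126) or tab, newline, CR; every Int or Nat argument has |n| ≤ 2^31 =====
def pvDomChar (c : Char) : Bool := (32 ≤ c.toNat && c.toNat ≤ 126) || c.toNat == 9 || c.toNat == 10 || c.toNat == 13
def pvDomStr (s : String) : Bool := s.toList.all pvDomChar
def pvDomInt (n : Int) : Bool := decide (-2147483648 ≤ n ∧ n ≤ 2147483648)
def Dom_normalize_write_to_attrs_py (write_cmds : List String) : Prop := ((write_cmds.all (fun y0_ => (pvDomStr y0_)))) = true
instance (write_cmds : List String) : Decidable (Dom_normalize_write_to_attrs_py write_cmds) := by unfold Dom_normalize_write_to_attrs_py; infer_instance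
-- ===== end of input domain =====

-- ===== PORT A =====
-- B classifies each command through an inverted trigger→attribute map in one pass instead of
-- intersecting a global lowered set with per-attribute trigger sets (objective: alternative).
-- Port of A: build the lowered command set, then two explicit if-branches (power, volume).
def normalize_write_to_attrs_py (write_cmds : List String) : List String × (List (String × List String)) :=
  let cmds : PySem.Set String := PySem.Set.ofList (write_cmds.map PySem.Str.lower)
  let attr2cmds : PySem.Dict String (List String) := PySem.Dict.empty
  let attr2cmds :=
    if PySem.Set.contains cmds "on" || PySem.Set.contains cmds "off" then
      attr2cmds.insert "power" (PySem.Set.ofList (PySem.Set.inter cmds ["on", "off"]))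
    else attr2cmds
  let attr2cmds :=
    if PySem.Set.contains cmds "volume" then attr2cmds.insert "volume" ["volume"]
    else attr2cmds
  (attr2cmds.keys, attr2cmds.items)

-- ===== PORT B =====
def pvTrig2Attr : PySem.Dict String String :=
  ((PySem.Dict.empty.insert "on" "power").insert "off" "power").insert "volume" "volume"

def pvAttrOrder : List String := ["power", "volume"]

-- loop body: lower the command, look up its attribute, group it (setdefault(...).add(lc))
def pvStep (d : PySem.Dict String (List String)) (c : String) : PySem.Dict String (List String) :=
  let lc := PySem.Str.lower c
  match pvTrig2Attr.get? lc with
  | none => d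
  | some attr => d.modify attr [] (fun s => PySem.Set.add s lc)

def normalize_write_to_attrs_py_alt (write_cmds : List String) : List String × (List (String × List String)) :=
  let grouped : PySem.Dict String (List String) := write_cmds.foldl pvStep PySem.Dict.empty
  let attr2cmds : List (String × List String) :=
    (pvAttrOrder.filter (fun a => grouped.contains a)).map (fun a => (a, grouped.getD a []))
  (attr2cmds.map Prod.fst, attr2cmds)

-- ===== PRECONDITION & SPEC =====
def Spec_normalize_write_to_attrs_py (write_cmds : List String) (out : List String × (List (String × List String))) : Prop := out = normalize_write_to_attrs_py_alt write_cmds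
instance (write_cmds : List String) (out : List String × (List (String × List String))) : Decidable (Spec_normalize_write_to_attrs_py write_cmds out) := by unfold Spec_normalize_write_to_attrs_py; infer_instance

-- ===== CLAIM =====
def Claim_equal_normalize_write_to_attrs_py : Prop := ∀ (write_cmds : List String), Dom_normalize_write_to_attrs_py write_cmds → Spec_normalize_write_to_attrs_py write_cmds (normalize_write_to_attrs_py write_cmds)

-- ===== LEMMAS AND PROOFS =====

lemma inter_filter (s t : List String) : PySem.Set.inter s t = s.filter (fun y => t.contains y) := by
  simp [PySem.Set.inter]

lemma filter_discard (p : String → Bool) (s : List String) (x : String) :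
    List.filter p (PySem.Set.discard s x) = PySem.Set.discard (List.filter p s) x := by
  simp only [PySem.Set.discard, List.filter_filter]
  exact List.filter_congr (fun a _ => Bool.and_comm _ _)

lemma discard_of_not_mem (s : List String) (x : String) (h : x ∉ s) :
    PySem.Set.discard s x = s := by
  simp [PySem.Set.discard, List.filter_eq_self]
  intro a ha
  rintro rfl; exact h ha

lemma filter_ofList (p : String → Bool) (L : List String) :
    PySem.Set.ofList (L.filter p) = List.filter p (PySem.Set.ofList L) := by
  induction L with
  | nil => rfl
  | cons x L ih =>
    rw [PySem.Set.ofList_cons, List.filter_cons]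
    by_cases hp : p x
    · simp only [hp, if_true]
      rw [PySem.Set.ofList_cons, ih]
      simp only [List.filter_cons, hp, if_true, filter_discard]
    · simp only [hp, Bool.false_eq_true, if_false]
      rw [ih]
      simp only [List.filter_cons, hp, Bool.false_eq_true, if_false, filter_discard]
      rw [discard_of_not_mem]
      intro hmem
      exact hp (List.of_mem_filter hmem)

lemma singleton_of_mem (l : List String) (a : String) (hn : l.Nodup) (hm : a ∈ l)
    (hall : ∀ x ∈ l, x = a) : l = [a] := by
  match l, hn with
  | [], _ => cases hm
  | b :: t, hn =>
    have hb : b = a := hall b (List.mem_cons_self)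
    subst hb
    have : t = [] := by
      cases t with
      | nil => rfl
      | cons c u =>
        exfalso
        have hc : c = b := hall c (by simp)
        simp [hc] at hn
    simp [this]

-- fold characterisations ----------------------------------------------------

def pvPowPred (lc : String) : Bool := lc == "on" || lc == "off"
def pvVolPred (lc : String) : Bool := lc == "volume"

lemma pvStep_on (d : PySem.Dict String (List String)) (c : String) (h : PySem.Str.lower c = "on") :
    pvStep d c = d.modify "power" [] (fun s => PySem.Set.add s (PySem.Str.lower c)) := by
  simp [pvStep, pvTrig2Attr, h, PySem.Dict.get?_insert]

lemma pvStep_off (d : PySem.Dict String (List String)) (c : String) (h : PySem.Str.lower c = "off") :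
    pvStep d c = d.modify "power" [] (fun s => PySem.Set.add s (PySem.Str.lower c)) := by
  simp [pvStep, pvTrig2Attr, h, PySem.Dict.get?_insert]

lemma pvStep_vol (d : PySem.Dict String (List String)) (c : String) (h : PySem.Str.lower c = "volume") :
    pvStep d c = d.modify "volume" [] (fun s => PySem.Set.add s (PySem.Str.lower c)) := by
  simp [pvStep, pvTrig2Attr, h]

lemma pvStep_other (d : PySem.Dict String (List String)) (c : String)
    (h1 : PySem.Str.lower c ≠ "on") (h2 : PySem.Str.lower c ≠ "off") (h3 : PySem.Str.lower c ≠ "volume") :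
    pvStep d c = d := by
  simp [pvStep, pvTrig2Attr, PySem.Dict.get?_insert, h1, h2, h3]

lemma fold_getD_pow (xs : List String) : ∀ d : PySem.Dict String (List String),
    (xs.foldl pvStep d).getD "power" [] =
      PySem.Set.update (d.getD "power" []) ((xs.map PySem.Str.lower).filter pvPowPred) := by
  induction xs with
  | nil => intro d; rfl
  | cons x xs ih =>
    intro d
    simp only [List.foldl_cons, List.map_cons, List.filter_cons]
    rw [ih]
    by_cases h1 : PySem.Str.lower x = "on"
    · rw [pvStep_on d x h1]
      simp [pvPowPred, h1, PySem.Dict.getD_modify_self, PySem.Set.update_cons]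
    · by_cases h2 : PySem.Str.lower x = "off"
      · rw [pvStep_off d x h2]
        simp [pvPowPred, h2, PySem.Dict.getD_modify_self, PySem.Set.update_cons]
      · by_cases h3 : PySem.Str.lower x = "volume"
        · rw [pvStep_vol d x h3]
          simp [pvPowPred, h3, PySem.Dict.getD_modify]
        · rw [pvStep_other d x h1 h2 h3]
          simp [pvPowPred, h1, h2]

lemma fold_getD_vol (xs : List String) : ∀ d : PySem.Dict String (List String),
    (xs.foldl pvStep d).getD "volume" [] =
      PySem.Set.update (d.getD "volume" []) ((xs.map PySem.Str.lower).filter pvVolPred) := by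
  induction xs with
  | nil => intro d; rfl
  | cons x xs ih =>
    intro d
    simp only [List.foldl_cons, List.map_cons, List.filter_cons]
    rw [ih]
    by_cases h3 : PySem.Str.lower x = "volume"
    · rw [pvStep_vol d x h3]
      simp [pvVolPred, h3, PySem.Dict.getD_modify_self, PySem.Set.update_cons]
    · by_cases h1 : PySem.Str.lower x = "on"
      · rw [pvStep_on d x h1]
        simp [pvVolPred, h1, PySem.Dict.getD_modify]
      · by_cases h2 : PySem.Str.lower x = "off"
        · rw [pvStep_off d x h2]
          simp [pvVolPred, h2, PySem.Dict.getD_modify]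
        · rw [pvStep_other d x h1 h2 h3]
          simp [pvVolPred, h3]

lemma fold_contains_pow (xs : List String) : ∀ d : PySem.Dict String (List String),
    (xs.foldl pvStep d).contains "power" =
      (d.contains "power" || !((xs.map PySem.Str.lower).filter pvPowPred).isEmpty) := by
  induction xs with
  | nil => intro d; simp
  | cons x xs ih =>
    intro d
    simp only [List.foldl_cons, List.map_cons, List.filter_cons]
    rw [ih]
    by_cases h1 : PySem.Str.lower x = "on"
    · rw [pvStep_on d x h1]
      simp [pvPowPred, h1, PySem.Dict.contains_modify]
    · by_cases h2 : PySem.Str.lower x = "off"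
      · rw [pvStep_off d x h2]
        simp [pvPowPred, h2, PySem.Dict.contains_modify]
      · by_cases h3 : PySem.Str.lower x = "volume"
        · rw [pvStep_vol d x h3]
          simp [pvPowPred, h3, PySem.Dict.contains_modify]
        · rw [pvStep_other d x h1 h2 h3]
          simp [pvPowPred, h1, h2]

lemma fold_contains_vol (xs : List String) : ∀ d : PySem.Dict String (List String),
    (xs.foldl pvStep d).contains "volume" =
      (d.contains "volume" || !((xs.map PySem.Str.lower).filter pvVolPred).isEmpty) := by
  induction xs with
  | nil => intro d; simp
  | cons x xs ih =>
    intro d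
    simp only [List.foldl_cons, List.map_cons, List.filter_cons]
    rw [ih]
    by_cases h3 : PySem.Str.lower x = "volume"
    · rw [pvStep_vol d x h3]
      simp [pvVolPred, h3, PySem.Dict.contains_modify]
    · by_cases h1 : PySem.Str.lower x = "on"
      · rw [pvStep_on d x h1]
        simp [pvVolPred, h1, PySem.Dict.contains_modify]
      · by_cases h2 : PySem.Str.lower x = "off"
        · rw [pvStep_off d x h2]
          simp [pvVolPred, h2, PySem.Dict.contains_modify]
        · rw [pvStep_other d x h1 h2 h3]
          simp [pvVolPred, h3]

-- ===== VERDICT =====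
theorem normalize_write_to_attrs_py_spec : Claim_equal_normalize_write_to_attrs_py := by
  intro write_cmds _
  unfold Spec_normalize_write_to_attrs_py normalize_write_to_attrs_py normalize_write_to_attrs_py_alt
  set L := write_cmds.map PySem.Str.lower with hL
  have hq : ∀ y : String, (List.contains ["on", "off"] y) = pvPowPred y := by
    intro y
    by_cases h1 : y = "on" <;> by_cases h2 : y = "off" <;> simp [pvPowPred, h1, h2]
  have hinterPow : PySem.Set.ofList (PySem.Set.inter (PySem.Set.ofList L) ["on", "off"]) =
      PySem.Set.ofList (L.filter pvPowPred) := by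
    rw [inter_filter, List.filter_congr (fun y _ => hq y), ← filter_ofList, PySem.Set.ofList_ofList]
  have hfoldPow : (write_cmds.foldl pvStep PySem.Dict.empty).getD "power" [] =
      PySem.Set.ofList (L.filter pvPowPred) := by
    rw [fold_getD_pow, PySem.Dict.getD_empty, PySem.Set.update_nil_left]
  have hfoldVol : (write_cmds.foldl pvStep PySem.Dict.empty).getD "volume" [] =
      PySem.Set.ofList (L.filter pvVolPred) := by
    rw [fold_getD_vol, PySem.Dict.getD_empty, PySem.Set.update_nil_left]
  have hcPow : (write_cmds.foldl pvStep PySem.Dict.empty).contains "power" =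
      !(L.filter pvPowPred).isEmpty := by
    rw [fold_contains_pow]; simp [← hL]
  have hcVol : (write_cmds.foldl pvStep PySem.Dict.empty).contains "volume" =
      !(L.filter pvVolPred).isEmpty := by
    rw [fold_contains_vol]; simp [← hL]
  by_cases hp : (("on" : String) ∈ L ∨ ("off" : String) ∈ L) <;>
    by_cases hv : ("volume" : String) ∈ L
  all_goals {
    first
    | (have hPA : (L.filter pvPowPred) ≠ [] := by
         rcases hp with h | h
         · exact fun hnil => (List.not_mem_nil (a := ("on" : String)))
             (hnil ▸ List.mem_filter.mpr ⟨h, by simp [pvPowPred]⟩)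
         · exact fun hnil => (List.not_mem_nil (a := ("off" : String)))
             (hnil ▸ List.mem_filter.mpr ⟨h, by simp [pvPowPred]⟩))
    | (have hPA : (L.filter pvPowPred) = [] := by
         rw [List.filter_eq_nil_iff]
         intro y hy hpy
         rcases (by simpa [pvPowPred] using hpy : y = "on" ∨ y = "off") with rfl | rfl
         · exact hp (Or.inl hy)
         · exact hp (Or.inr hy))
    first
    | (have hVA : (L.filter pvVolPred) ≠ [] := fun hnil =>
         (List.not_mem_nil (a := ("volume" : String)))
           (hnil ▸ List.mem_filter.mpr ⟨hv, by simp [pvVolPred]⟩))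
    | (have hVA : (L.filter pvVolPred) = [] := by
         rw [List.filter_eq_nil_iff]
         intro y hy hpy
         exact hv ((by simpa [pvVolPred] using hpy : y = "volume") ▸ hy))
    first
    | (have hVval : PySem.Set.ofList (L.filter pvVolPred) = ["volume"] := by
         apply singleton_of_mem _ _ (PySem.Set.nodup_ofList _)
         · exact (PySem.Set.mem_ofList _ _).mpr (List.mem_filter.mpr ⟨hv, by simp [pvVolPred]⟩)
         · intro x hx
           have := (List.mem_filter.mp ((PySem.Set.mem_ofList _ _).mp hx)).2
           simpa [pvVolPred] using this)
    | skip
    have hAon : PySem.Set.contains (PySem.Set.ofList L) "on" = decide (("on" : String) ∈ L) := by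
      simp [PySem.Set.mem_ofList]
    have hAoff : PySem.Set.contains (PySem.Set.ofList L) "off" = decide (("off" : String) ∈ L) := by
      simp [PySem.Set.mem_ofList]
    have hAvol : PySem.Set.contains (PySem.Set.ofList L) "volume" = decide (("volume" : String) ∈ L) := by
      simp [PySem.Set.mem_ofList]
    first
    | have hcP : (write_cmds.foldl pvStep PySem.Dict.empty).contains "power" = true := by
        rw [hcPow]; simp [hPA]
    | have hcP : (write_cmds.foldl pvStep PySem.Dict.empty).contains "power" = false := by
        rw [hcPow]; simp [hPA]
    first
    | have hcV : (write_cmds.foldl pvStep PySem.Dict.empty).contains "volume" = true := by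
        rw [hcVol]; simp [hVA]
    | have hcV : (write_cmds.foldl pvStep PySem.Dict.empty).contains "volume" = false := by
        rw [hcVol]; simp [hVA]
    have hie : PySem.Dict.empty.items = ([] : List (String × List String)) := rfl
    first
    | rw [hVval] at hfoldVol
    | skip
    simp only [hAon, hAoff, hAvol, hinterPow]
    simp [pvAttrOrder, hp, hv, hcP, hcV, hfoldPow, hfoldVol, hie,
      PySem.Dict.items_insert, PySem.Dict.contains_insert,
      PySem.Dict.contains_empty, PySem.Dict.keys]
  }
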